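-- pv_equiv track=rewrite | github.com/xupeiwust/noether | src/noether/core/utils/logging/formatting.py | summarize_indices_list
-- ===== SOURCE A (Python) =====
-- from itertools import groupby
--
-- def summarize_indices_list(indices: list[int]) -> list[str]:
--     """Summarize a list of indices into ranges.
--
--     Example: [0, 1, 2, 3, 6, 7, 8] -> ["0-3", "6-8"]
--
--     Args:
--         indices: The list of indices to summarize.
--
--     Returns:
--         A list of strings representing the summarized indices.
--     """
--     if indices is None:
--         return ["all"]
--     if not indices:
--         return []
--
--         # Ensure indices are sorted and unique for groupby logic
--     indices = sorted(set(indices))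
--
--     result = []
--     # Group by the difference between the value and its index
--     for k, g in groupby(enumerate(indices), key=lambda x: x[1] - x[0]):
--         # g is an iterator of (index, value) tuples
--         group = list(g)
--         first_val = group[0][1]  # Get value from first item in group
--         last_val = group[-1][1]  # Get value from last item in group
--
--         if first_val == last_val:
--             result.append(str(first_val))
--         else:
--             result.append(f"{first_val}-{last_val}")
--
--     return result
-- ===== SOURCE B (Python) =====
-- def summarize_indices_list(indices: list[int]) -> list[str]:
--     """Summarize a sorted-unique view of indices into range strings."""
--     if indices is None:
--         return ["all"]
--     if not indices:
--         return []
--     indices = sorted(set(indices))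
--     result = []
--     start = prev = indices[0]
--     for current in indices[1:]:
--         if current != prev + 1:
--             result.append(str(start) if start == prev else f"{start}-{prev}")
--             start = current
--         prev = current
--     result.append(str(start) if start == prev else f"{start}-{prev}")
--     return result
-- ===== Notes on version B (the rewrite author's own statement) =====
-- stated objective: idiomatic
-- what changed: Replaces the itertools.groupby-on-(value-position) trick and per-group list materialization with an explicit single pass keeping run boundary variables start/prev and flushing a run whenever current != prev + 1.
import Mathlib
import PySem

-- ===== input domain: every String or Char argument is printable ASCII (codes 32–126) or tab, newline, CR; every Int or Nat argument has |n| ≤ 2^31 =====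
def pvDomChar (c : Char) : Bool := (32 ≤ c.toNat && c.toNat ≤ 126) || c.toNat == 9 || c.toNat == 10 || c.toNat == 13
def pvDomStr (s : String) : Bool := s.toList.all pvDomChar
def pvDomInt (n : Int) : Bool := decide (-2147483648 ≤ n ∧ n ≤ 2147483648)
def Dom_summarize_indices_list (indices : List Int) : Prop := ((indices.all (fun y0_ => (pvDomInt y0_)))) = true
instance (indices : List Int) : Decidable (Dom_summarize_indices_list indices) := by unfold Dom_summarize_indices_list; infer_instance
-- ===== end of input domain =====

-- B replaces the groupby-on-(value-position) pass with an explicit run loop over start/prev boundaries (idiomatic; same cost).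
-- The Python `indices is None` branch is unreachable for a `List Int` argument and is not ported.

-- ===== PORT A =====
-- shared string formatting of a run (str(a) vs f"{a}-{b}")
def pvFmt (a b : Int) : String :=
  if a = b then PySem.Int.toStr a else PySem.Int.toStr a ++ "-" ++ PySem.Int.toStr b

-- itertools.groupby: maximal chunks of consecutive elements with equal key
def pvGroupBy (key : Int × Int → Int) : List (Int × Int) → List (List (Int × Int))
  | [] => []
  | x :: xs =>
    (x :: xs.takeWhile (fun y => key y == key x)) ::
      pvGroupBy key (xs.dropWhile (fun y => key y == key x))
termination_by l => l.length
decreasing_by simpa using Nat.lt_succ_of_le (List.length_dropWhile_le _ _)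

def summarize_indices_list (indices : List Int) : List String :=
  if indices = [] then []
  else
    let idxs := PySem.List.sorted (PySem.Set.ofList indices) (fun x => x) false
    -- group[0][1] / group[-1][1]: the group is always nonempty, so the defaults are never used
    (pvGroupBy (fun x => x.2 - x.1) (PySem.List.enumerate idxs)).foldl
      (fun result group =>
        let first_val := (group.headD (0, 0)).2
        let last_val := (group.getLastD (0, 0)).2
        result ++ [pvFmt first_val last_val]) []

-- ===== PORT B =====
def pvRunLoop (start prev : Int) (result : List String) : List Int → List String
  | [] => result ++ [pvFmt start prev]
  | c :: cs =>
    if c ≠ prev + 1 then pvRunLoop c c (result ++ [pvFmt start prev]) cs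
    else pvRunLoop start c result cs

def summarize_indices_list_alt (indices : List Int) : List String :=
  if indices = [] then []
  else
    match PySem.List.sorted (PySem.Set.ofList indices) (fun x => x) false with
    | [] => []
    | h :: t => pvRunLoop h h [] t

-- ===== PRECONDITION & SPEC =====
def Spec_summarize_indices_list (indices : List Int) (out : List String) : Prop := out = summarize_indices_list_alt indices
instance (indices : List Int) (out : List String) : Decidable (Spec_summarize_indices_list indices out) := by unfold Spec_summarize_indices_list; infer_instance

-- ===== CLAIM (what is proved, stated in full; the proofs are below) =====
def Claim_equal_summarize_indices_list : Prop := ∀ (indices : List Int), Dom_summarize_indices_list indices → Spec_summarize_indices_list indices (summarize_indices_list indices)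

-- ===== LEMMAS AND PROOFS =====

def pvFmtGroup (g : List (Int × Int)) : String := pvFmt (g.headD (0, 0)).2 (g.getLastD (0, 0)).2

theorem pvRunLoop_acc (l : List Int) : ∀ (s p : Int) (acc : List String),
    pvRunLoop s p acc l = acc ++ pvRunLoop s p [] l := by
  induction l with
  | nil => intro s p acc; simp [pvRunLoop]
  | cons c cs ih =>
    intro s p acc
    simp only [pvRunLoop]
    split
    · rw [ih c c (acc ++ [pvFmt s p]), List.nil_append, ih c c [pvFmt s p]]; simp
    · exact ih _ _ _

theorem pvFoldl_fmt (gs : List (List (Int × Int))) : ∀ (acc : List String),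
    gs.foldl (fun result group =>
        result ++ [pvFmt (group.headD (0, 0)).2 (group.getLastD (0, 0)).2]) acc
      = acc ++ gs.map pvFmtGroup := by
  induction gs with
  | nil => intro acc; simp
  | cons g gs ih => intro acc; rw [List.foldl_cons, ih]; simp [pvFmtGroup]

theorem pvMain (l : List Int) : ∀ (n k fv prev : Int), prev - (n - 1) = k →
    pvFmt fv ((((PySem.List.enumerate l n).takeWhile (fun y => y.2 - y.1 == k)).getLastD
        (n - 1, prev)).2)
      :: ((pvGroupBy (fun x => x.2 - x.1)
            ((PySem.List.enumerate l n).dropWhile (fun y => y.2 - y.1 == k))).map pvFmtGroup)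
    = pvRunLoop fv prev [] l := by
  induction l with
  | nil =>
    intro n k fv prev _
    simp [PySem.List.enumerate, pvGroupBy, pvRunLoop]
  | cons c cs ih =>
    intro n k fv prev hinv
    rw [PySem.List.enumerate_cons]
    by_cases hc : c - n = k
    · have hprev : c = prev + 1 := by omega
      have h1 : ((n, c) :: PySem.List.enumerate cs (n + 1)).takeWhile
          (fun y => y.2 - y.1 == k)
          = (n, c) :: (PySem.List.enumerate cs (n + 1)).takeWhile (fun y => y.2 - y.1 == k) := by
        simp [hc]
      have h2 : ((n, c) :: PySem.List.enumerate cs (n + 1)).dropWhile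
          (fun y => y.2 - y.1 == k)
          = (PySem.List.enumerate cs (n + 1)).dropWhile (fun y => y.2 - y.1 == k) := by
        simp [hc]
      rw [h1, h2, List.getLastD_cons]
      have := ih (n + 1) k fv c (by omega)
      simp only [show n + 1 - 1 = n by omega] at this
      rw [this]
      simp [pvRunLoop, hprev]
    · have hprev : c ≠ prev + 1 := by omega
      have h1 : ((n, c) :: PySem.List.enumerate cs (n + 1)).takeWhile
          (fun y => y.2 - y.1 == k) = [] := by
        simp [hc]
      have h2 : ((n, c) :: PySem.List.enumerate cs (n + 1)).dropWhile
          (fun y => y.2 - y.1 == k)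
          = (n, c) :: PySem.List.enumerate cs (n + 1) := by
        simp [hc]
      rw [h1, h2]
      rw [pvGroupBy]
      have := ih (n + 1) (c - n) c c (by omega)
      simp only [show n + 1 - 1 = n by omega] at this
      simp only [List.map_cons, pvFmtGroup, List.headD_cons, List.getLastD_cons]
      rw [this]
      simp only [pvRunLoop, if_pos hprev]
      rw [List.nil_append, pvRunLoop_acc cs c c [pvFmt fv prev]]
      simp

-- ===== VERDICT (by name: the statement is the Claim_ definition above) =====
theorem summarize_indices_list_spec : Claim_equal_summarize_indices_list := by
  intro indices _
  unfold Spec_summarize_indices_list summarize_indices_list summarize_indices_list_alt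
  by_cases hnil : indices = []
  · simp [hnil]
  · simp only [if_neg hnil]
    cases hs : PySem.List.sorted (PySem.Set.ofList indices) (fun x => x) false with
    | nil => simp [PySem.List.enumerate, pvGroupBy]
    | cons h t =>
      rw [pvFoldl_fmt]
      simp only [List.nil_append]
      show (pvGroupBy _ (PySem.List.enumerate (h :: t) 0)).map pvFmtGroup = _
      rw [PySem.List.enumerate_cons, pvGroupBy]
      simp only [List.map_cons, pvFmtGroup, List.headD_cons, List.getLastD_cons]
      have := pvMain t 1 (h - 0) h h (by omega)
      simp only [show (1 : Int) - 1 = 0 by omega, show h - 0 = h from by omega] at this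
      simp only [show (0:Int) + 1 = 1 from rfl]
      rw [show ((h:Int) - 0) = h from by omega] at *
      rw [this]
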